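-- pv_equiv track=rewrite | github.com/B28LH/book-builder | book_builder/content/syllabus_tables.py | parse_learning_outcomes
-- ===== SOURCE A (Python) =====
-- from collections import OrderedDict
-- from typing import Iterable, Dict, List, Tuple
--
-- def parse_learning_outcomes(lo_rows: Iterable[Dict[str, str]]) -> OrderedDict:
--     data: OrderedDict[str, OrderedDict[str, List[Tuple[str, str]]]] = OrderedDict()
--     count = {}
--     for row in lo_rows:
--         strand = row.get('Strand','').strip()
--         substrand = row.get('Sub-Strand','').strip()
--         outcome = row.get('Learning Outcomes','').strip()
--         if not strand or not substrand or not outcome: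
--             continue
--         if strand not in data:
--             data[strand] = OrderedDict()
--             count[strand] = {}
--         if substrand not in data[strand]:
--             data[strand][substrand] = []
--             count[strand][substrand] = 0
--         count[strand][substrand] += 1
--         letter = chr(96 + count[strand][substrand])
--         data[strand][substrand].append((letter, outcome))
--     return data
-- ===== SOURCE B (Python) =====
-- from collections import OrderedDict
--
-- def parse_learning_outcomes(lo_rows):
--     # Pass 1: group plain outcome strings by strand / sub-strand (no counter).
--     groups = OrderedDict()
--     for row in lo_rows:
--         strand = row.get('Strand', '').strip()
--         substrand = row.get('Sub-Strand', '').strip()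
--         outcome = row.get('Learning Outcomes', '').strip()
--         if strand and substrand and outcome:
--             groups.setdefault(strand, OrderedDict()).setdefault(substrand, []).append(outcome)
--     # Pass 2: label each sub-strand's outcomes a, b, c, ...
--     for subs in groups.values():
--         for sub, outs in subs.items():
--             subs[sub] = [(chr(97 + i), o) for i, o in enumerate(outs)]
--     return groups
-- ===== Notes on version B (the rewrite author's own statement) =====
-- stated objective: simpler
-- what changed: Replaces the single pass that maintains a parallel nested count dict and two explicit key-initialisation branches with two passes: setdefault-based grouping of plain outcome strings, then labeling each list via enumerate, so the count structure disappears.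
import Mathlib
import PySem

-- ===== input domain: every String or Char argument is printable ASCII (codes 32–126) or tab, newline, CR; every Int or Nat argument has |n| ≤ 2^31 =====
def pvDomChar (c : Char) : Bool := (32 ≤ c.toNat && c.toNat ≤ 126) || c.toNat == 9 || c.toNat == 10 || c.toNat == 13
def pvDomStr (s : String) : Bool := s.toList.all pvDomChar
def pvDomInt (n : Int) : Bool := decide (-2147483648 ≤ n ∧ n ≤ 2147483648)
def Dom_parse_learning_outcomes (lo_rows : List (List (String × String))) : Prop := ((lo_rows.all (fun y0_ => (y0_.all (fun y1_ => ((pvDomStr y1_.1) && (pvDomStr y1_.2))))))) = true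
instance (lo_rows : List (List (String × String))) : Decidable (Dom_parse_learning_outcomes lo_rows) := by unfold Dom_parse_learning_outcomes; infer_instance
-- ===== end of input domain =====

-- B regroups first (setdefault, plain strings) and labels with enumerate in a second pass,
-- removing A's parallel nested count dict; same return value, same cost.

-- chr(n): exact for 0 ≤ n < 0xD800 (the only values occurring: 97 + a list index)
def pyChr (n : Int) : String := String.ofList [Char.ofNat n.toNat]

-- row.get(k, ''): association-list lookup, first match
def rowGet (row : List (String × String)) (k : String) : String :=
  ((row.find? (fun p => p.1 == k)).map (fun p => p.2)).getD ""

-- ===== PORT A =====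
def pla_step
    (st : PySem.Dict String (PySem.Dict String (List (String × String))) × PySem.Dict String (PySem.Dict String Int))
    (row : List (String × String)) :
    PySem.Dict String (PySem.Dict String (List (String × String))) × PySem.Dict String (PySem.Dict String Int) :=
  let strand := PySem.Str.strip (rowGet row "Strand")
  let substrand := PySem.Str.strip (rowGet row "Sub-Strand")
  let outcome := PySem.Str.strip (rowGet row "Learning Outcomes")
  if strand == "" || substrand == "" || outcome == "" then st
  else
    let data := st.1
    let count := st.2
    -- if strand not in data: data[strand] = OrderedDict(); count[strand] = {}
    let data1 := if !(data.contains strand) then data.insert strand PySem.Dict.empty else data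
    let count1 := if !(data.contains strand) then count.insert strand PySem.Dict.empty else count
    -- if substrand not in data[strand]: data[strand][substrand] = []; count[strand][substrand] = 0
    let data2 := if !((data1.getD strand PySem.Dict.empty).contains substrand)
      then data1.modify strand PySem.Dict.empty (fun m => m.insert substrand []) else data1
    let count2 := if !((data1.getD strand PySem.Dict.empty).contains substrand)
      then count1.modify strand PySem.Dict.empty (fun m => m.insert substrand 0) else count1
    -- count[strand][substrand] += 1
    let count3 := count2.modify strand PySem.Dict.empty (fun m => m.modify substrand 0 (fun c => c + 1))
    -- letter = chr(96 + count[strand][substrand])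
    let letter := pyChr (96 + (count3.getD strand PySem.Dict.empty).getD substrand 0)
    -- data[strand][substrand].append((letter, outcome))
    let data3 := data2.modify strand PySem.Dict.empty
        (fun m => m.modify substrand [] (fun l => l ++ [(letter, outcome)]))
    (data3, count3)

def parse_learning_outcomes (lo_rows : List (List (String × String))) : List (String × List (String × List (String × String))) :=
  let st := lo_rows.foldl pla_step (PySem.Dict.empty, PySem.Dict.empty)
  st.1.items.map (fun p => (p.1, p.2.items))

-- ===== PORT B =====
def plb_group
    (g : PySem.Dict String (PySem.Dict String (List String)))
    (row : List (String × String)) : PySem.Dict String (PySem.Dict String (List String)) :=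
  let strand := PySem.Str.strip (rowGet row "Strand")
  let substrand := PySem.Str.strip (rowGet row "Sub-Strand")
  let outcome := PySem.Str.strip (rowGet row "Learning Outcomes")
  if !(strand == "") && !(substrand == "") && !(outcome == "") then
    -- groups.setdefault(strand, OrderedDict()).setdefault(substrand, []).append(outcome)
    g.modify strand PySem.Dict.empty (fun inn => inn.modify substrand [] (fun l => l ++ [outcome]))
  else g

-- [(chr(97+i), o) for i, o in enumerate(outs)]
def labelList (outs : List String) : List (String × String) :=
  (PySem.List.enumerate outs).map (fun e => (pyChr (97 + e.1), e.2))

def parse_learning_outcomes_alt (lo_rows : List (List (String × String))) : List (String × List (String × List (String × String))) :=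
  let g := lo_rows.foldl plb_group PySem.Dict.empty
  g.items.map (fun p => (p.1, p.2.items.map (fun q => (q.1, labelList q.2))))

-- ===== PRECONDITION & SPEC =====
def Spec_parse_learning_outcomes (lo_rows : List (List (String × String))) (out : List (String × List (String × List (String × String)))) : Prop := out = parse_learning_outcomes_alt lo_rows
instance (lo_rows : List (List (String × String))) (out : List (String × List (String × List (String × String)))) : Decidable (Spec_parse_learning_outcomes lo_rows out) := by unfold Spec_parse_learning_outcomes; infer_instance

-- ===== CLAIM (what is proved, stated in full; the proofs are below) =====
def Claim_equal_parse_learning_outcomes : Prop := ∀ (lo_rows : List (List (String × String))), Dom_parse_learning_outcomes lo_rows → Spec_parse_learning_outcomes lo_rows (parse_learning_outcomes lo_rows)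

-- ===== LEMMAS AND PROOFS =====

-- value-map on a Dict (keys and order untouched); the invariant sends B's grouping state to both of A's dicts
def mapVals {κ ν ν' : Type} (f : ν → ν') (d : PySem.Dict κ ν) : PySem.Dict κ ν' :=
  PySem.Dict.mk (d.items.map (fun p => (p.1, f p.2)))

theorem mapVals_empty {κ ν ν' : Type} (f : ν → ν') :
    mapVals f (PySem.Dict.empty : PySem.Dict κ ν) = PySem.Dict.empty := rfl

theorem contains_mapVals {κ ν ν' : Type} [BEq κ] (f : ν → ν') (d : PySem.Dict κ ν) (k : κ) :
    (mapVals f d).contains k = d.contains k := by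
  simp only [mapVals, PySem.Dict.contains, List.any_map]
  congr 1

theorem get?_mapVals {κ ν ν' : Type} [BEq κ] (f : ν → ν') (d : PySem.Dict κ ν) (k : κ) :
    (mapVals f d).get? k = (d.get? k).map f := by
  simp only [mapVals, PySem.Dict.get?, List.find?_map]
  have hq : ((fun p => p.1 == k) ∘ fun p : κ × ν => (p.1, f p.2)) = (fun p : κ × ν => p.1 == k) := rfl
  rw [hq]
  cases List.find? (fun p : κ × ν => p.1 == k) d.items <;> rfl

theorem getD_mapVals {κ ν ν' : Type} [BEq κ] (f : ν → ν') (d : PySem.Dict κ ν) (k : κ) (d0 : ν) :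
    (mapVals f d).getD k (f d0) = f (d.getD k d0) := by
  simp only [PySem.Dict.getD, get?_mapVals]
  cases d.get? k <;> rfl

theorem insert_mapVals {κ ν ν' : Type} [BEq κ] (f : ν → ν') (d : PySem.Dict κ ν) (k : κ) (v : ν) :
    (mapVals f d).insert k (f v) = mapVals f (d.insert k v) := by
  simp only [PySem.Dict.insert, contains_mapVals]
  split
  · simp only [mapVals, List.map_map]
    congr 1
    apply List.map_congr_left
    intro p _
    by_cases h : (p.1 == k) = true <;> simp [h]
  · simp [mapVals]

-- A's two membership-initialisation branches followed by the final modify collapse to one modify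
-- (the branch conditions are passed as booleans because A reads them off `data` for both dicts)
theorem collapse {κ κ' ν : Type} [BEq κ] [LawfulBEq κ] [BEq κ'] [LawfulBEq κ']
    (d : PySem.Dict κ (PySem.Dict κ' ν)) (s : κ) (ss : κ') (z : ν) (h : ν → ν)
    (b1 : Bool) (hb1 : b1 = d.contains s)
    (d1 : PySem.Dict κ (PySem.Dict κ' ν))
    (hd1 : d1 = if !b1 then d.insert s PySem.Dict.empty else d)
    (b2 : Bool) (hb2 : b2 = (d1.getD s PySem.Dict.empty).contains ss)
    (d2 : PySem.Dict κ (PySem.Dict κ' ν))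
    (hd2 : d2 = if !b2 then d1.modify s PySem.Dict.empty (fun m => m.insert ss z) else d1) :
    d2.modify s PySem.Dict.empty (fun m => m.modify ss z h)
      = d.modify s PySem.Dict.empty (fun m => m.modify ss z h) := by
  by_cases hc : d.contains s = true
  · rw [hc] at hb1
    rw [hb1] at hd1
    simp only [Bool.not_true, Bool.false_eq_true, if_false] at hd1
    rw [hd1] at hb2 hd2
    by_cases hcc : (d.getD s PySem.Dict.empty).contains ss = true
    · rw [hcc] at hb2
      rw [hb2] at hd2
      simp only [Bool.not_true, Bool.false_eq_true, if_false] at hd2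
      rw [hd2]
    · rw [Bool.not_eq_true] at hcc
      rw [hcc] at hb2
      rw [hb2] at hd2
      simp only [Bool.not_false, if_true] at hd2
      rw [hd2]
      simp only [PySem.Dict.modify, PySem.Dict.getD_insert_self, PySem.Dict.insert_insert_self,
        PySem.Dict.getD_of_not_contains _ _ hcc]
  · rw [Bool.not_eq_true] at hc
    rw [hc] at hb1
    rw [hb1] at hd1
    simp only [Bool.not_false, if_true] at hd1
    rw [hd1] at hb2 hd2
    have hge : ((d.insert s PySem.Dict.empty).getD s PySem.Dict.empty)
        = (PySem.Dict.empty : PySem.Dict κ' ν) := PySem.Dict.getD_insert_self _ _ _ _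
    rw [hge, PySem.Dict.contains_empty] at hb2
    rw [hb2] at hd2
    simp only [Bool.not_false, if_true] at hd2
    rw [hd2]
    simp only [PySem.Dict.modify, hge, PySem.Dict.getD_insert_self, PySem.Dict.insert_insert_self,
      PySem.Dict.getD_of_not_contains _ _ hc, PySem.Dict.getD_empty]

-- labeling commutes with appending one outcome
theorem labelList_append (l : List String) (o : String) :
    labelList (l ++ [o]) = labelList l ++ [(pyChr (97 + (l.length : Int)), o)] := by
  simp [labelList, PySem.List.enumerate_append, PySem.List.enumerate_cons]

-- the step invariant: A's (data, count) state is B's grouping state under label / length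
theorem step_invariant (row : List (String × String)) (g : PySem.Dict String (PySem.Dict String (List String))) :
    pla_step (mapVals (mapVals labelList) g, mapVals (mapVals (fun l => (l.length : Int))) g) row
      = (mapVals (mapVals labelList) (plb_group g row),
         mapVals (mapVals (fun l => (l.length : Int))) (plb_group g row)) := by
  dsimp only [pla_step, plb_group]
  generalize PySem.Str.strip (rowGet row "Strand") = s1
  generalize PySem.Str.strip (rowGet row "Sub-Strand") = s2
  generalize PySem.Str.strip (rowGet row "Learning Outcomes") = s3
  by_cases hA : (s1 == "" || s2 == "" || s3 == "") = true
  · have hB : (!(s1 == "") && !(s2 == "") && !(s3 == "")) = false := by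
      revert hA; cases s1 == "" <;> cases s2 == "" <;> cases s3 == "" <;> simp
    rw [if_pos hA, if_neg (by simp [hB])]
  · have hA' : (s1 == "" || s2 == "" || s3 == "") = false := by
      revert hA; cases s1 == "" <;> cases s2 == "" <;> cases s3 == "" <;> simp
    have hB : (!(s1 == "") && !(s2 == "") && !(s3 == "")) = true := by
      revert hA'; cases s1 == "" <;> cases s2 == "" <;> cases s3 == "" <;> simp
    rw [if_neg (by simp [hA']), if_pos hB]
    -- identify A's state after the strand-initialisation branch as an image of one B-side dict
    have hkey : ∃ g1 : PySem.Dict String (PySem.Dict String (List String)),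
        (if (!(mapVals (mapVals labelList) g).contains s1) = true then
            (mapVals (mapVals labelList) g).insert s1 PySem.Dict.empty
          else mapVals (mapVals labelList) g) = mapVals (mapVals labelList) g1 ∧
        (if (!(mapVals (mapVals labelList) g).contains s1) = true then
            (mapVals (mapVals (fun l => (l.length : Int))) g).insert s1 PySem.Dict.empty
          else mapVals (mapVals (fun l => (l.length : Int))) g)
          = mapVals (mapVals (fun l => (l.length : Int))) g1 := by
      by_cases hg : g.contains s1 = true
      · exact ⟨g, by rw [contains_mapVals, hg]; rfl, by rw [contains_mapVals, hg]; rfl⟩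
      · rw [Bool.not_eq_true] at hg
        refine ⟨g.insert s1 PySem.Dict.empty, ?_, ?_⟩ <;>
          · rw [contains_mapVals, hg]
            exact insert_mapVals _ g s1 PySem.Dict.empty
    obtain ⟨g1, hdata1, hcount1⟩ := hkey
    -- the two inner-membership tests agree
    have hb2c :
        (((if (!(mapVals (mapVals labelList) g).contains s1) = true then
            (mapVals (mapVals labelList) g).insert s1 PySem.Dict.empty
          else mapVals (mapVals labelList) g)).getD s1 PySem.Dict.empty).contains s2
        = (((if (!(mapVals (mapVals labelList) g).contains s1) = true then
            (mapVals (mapVals (fun l => (l.length : Int))) g).insert s1 PySem.Dict.empty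
          else mapVals (mapVals (fun l => (l.length : Int))) g)).getD s1 PySem.Dict.empty).contains s2 := by
      rw [hdata1, hcount1]
      have e1 : (mapVals (mapVals labelList) g1).getD s1 PySem.Dict.empty
          = mapVals labelList (g1.getD s1 PySem.Dict.empty) :=
        getD_mapVals (mapVals labelList) g1 s1 PySem.Dict.empty
      have e2 : (mapVals (mapVals (fun l => (l.length : Int))) g1).getD s1 PySem.Dict.empty
          = mapVals (fun l => (l.length : Int)) (g1.getD s1 PySem.Dict.empty) :=
        getD_mapVals (mapVals (fun l => (l.length : Int))) g1 s1 PySem.Dict.empty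
      rw [e1, e2, contains_mapVals, contains_mapVals]
    have hb1c : (mapVals (mapVals labelList) g).contains s1
        = (mapVals (mapVals (fun l => (l.length : Int))) g).contains s1 := by
      rw [contains_mapVals, contains_mapVals]
    -- collapse A's count chain, then A's data chain, to a single modify each
    rw [collapse (mapVals (mapVals (fun l => (l.length : Int))) g) s1 s2 (0 : Int) (fun c => c + 1)
          ((mapVals (mapVals labelList) g).contains s1) hb1c _ rfl _ hb2c _ rfl]
    rw [collapse (mapVals (mapVals labelList) g) s1 s2 ([] : List (String × String)) _
          ((mapVals (mapVals labelList) g).contains s1) rfl _ rfl _ rfl _ rfl]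
    -- name the two nested lookups
    have hCgs : (mapVals (mapVals (fun l => (l.length : Int))) g).getD s1 PySem.Dict.empty
        = mapVals (fun l : List String => (l.length : Int)) (g.getD s1 PySem.Dict.empty) :=
      getD_mapVals _ g s1 PySem.Dict.empty
    have hDgs : (mapVals (mapVals labelList) g).getD s1 PySem.Dict.empty
        = mapVals labelList (g.getD s1 PySem.Dict.empty) :=
      getD_mapVals _ g s1 PySem.Dict.empty
    have hlen : (mapVals (fun l : List String => (l.length : Int)) (g.getD s1 PySem.Dict.empty)).getD s2 0
        = (((g.getD s1 PySem.Dict.empty).getD s2 []).length : Int) :=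
      getD_mapVals _ _ s2 []
    have hlab : (mapVals labelList (g.getD s1 PySem.Dict.empty)).getD s2 []
        = labelList ((g.getD s1 PySem.Dict.empty).getD s2 []) :=
      getD_mapVals labelList _ s2 []
    -- the incremented counter reads back the new length
    have hlet : (((mapVals (mapVals (fun l => (l.length : Int))) g).modify s1 PySem.Dict.empty
          (fun m => m.modify s2 0 (fun c => c + 1))).getD s1 PySem.Dict.empty).getD s2 0
        = (((g.getD s1 PySem.Dict.empty).getD s2 []).length : Int) + 1 := by
      simp only [PySem.Dict.modify, PySem.Dict.getD_insert_self]
      rw [hCgs, hlen]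
    rw [hlet]
    have harith : (96 : Int) + ((((g.getD s1 PySem.Dict.empty).getD s2 []).length : Int) + 1)
        = 97 + (((g.getD s1 PySem.Dict.empty).getD s2 []).length : Int) := by ring
    rw [harith]
    -- both components are images of B's one-modify update
    have hcount : (mapVals (mapVals (fun l => (l.length : Int))) g).modify s1 PySem.Dict.empty
          (fun m => m.modify s2 0 (fun c => c + 1))
        = mapVals (mapVals (fun l => (l.length : Int)))
            (g.modify s1 PySem.Dict.empty (fun inn => inn.modify s2 [] (fun l => l ++ [s3]))) := by
      simp only [PySem.Dict.modify]
      rw [hCgs, hlen]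
      have hl : ((((g.getD s1 PySem.Dict.empty).getD s2 []).length : Int) + 1)
          = (fun l : List String => (l.length : Int)) ((g.getD s1 PySem.Dict.empty).getD s2 [] ++ [s3]) := by
        simp
      rw [hl, insert_mapVals, insert_mapVals]
    have hdata : (mapVals (mapVals labelList) g).modify s1 PySem.Dict.empty
          (fun m => m.modify s2 []
            (fun l => l ++ [(pyChr (97 + (((g.getD s1 PySem.Dict.empty).getD s2 []).length : Int)), s3)]))
        = mapVals (mapVals labelList)
            (g.modify s1 PySem.Dict.empty (fun inn => inn.modify s2 [] (fun l => l ++ [s3]))) := by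
      simp only [PySem.Dict.modify]
      rw [hDgs, hlab, ← labelList_append, insert_mapVals, insert_mapVals]
    simp only [Prod.mk.injEq]
    exact ⟨hdata, hcount⟩
theorem fold_invariant (rows : List (List (String × String))) (g : PySem.Dict String (PySem.Dict String (List String))) :
    rows.foldl pla_step (mapVals (mapVals labelList) g, mapVals (mapVals (fun l => (l.length : Int))) g)
      = (mapVals (mapVals labelList) (rows.foldl plb_group g),
         mapVals (mapVals (fun l => (l.length : Int))) (rows.foldl plb_group g)) := by
  induction rows generalizing g with
  | nil => rfl
  | cons r rs ih => simp only [List.foldl_cons, step_invariant, ih]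

-- ===== VERDICT (by name: the statement is the Claim_ definition above) =====
theorem parse_learning_outcomes_spec : Claim_equal_parse_learning_outcomes := by
  intro lo_rows _
  unfold Spec_parse_learning_outcomes parse_learning_outcomes parse_learning_outcomes_alt
  have h := fold_invariant lo_rows PySem.Dict.empty
  rw [mapVals_empty, mapVals_empty] at h
  rw [h]
  simp [mapVals]
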